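-- pv_equiv track=rewrite | github.com/AstraZeneca/ontoverse-kg-choreographer | src/kgs_rnd_ontoverse/utils/networkx.py | count_occupancy_THG
-- ===== SOURCE A (Python) =====
-- def count_occupancy_THG(
--     topicGraphLevelNodes: dict[int, list[int]],
--     item_collection_dict: dict[int, list[int]],
-- ) -> dict[int, dict[int, int]]:
--     """
--     Count the number of times each item appears at each level of the Topic Hierarchy Graph (THG).
--
--     :param topicGraphLevelNodes: dictionary mapping levels to topic nodes.
--     :param item_collection_dict: dictionary mapping item IDs to topics.
--     :return: dictionary with item IDs and their occupancy counts at each level.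
--     """
--     multiOccupancyCounts = {}
--     # for item_id, topicCollection in item_collection_dict.items():
--     # itemLevelCounts = {
--     #     level: topicCollection.count(topic)
--     #     for level, levelNodes in topicGraphLevelNodes.items()
--     #     for topic in topicCollection if topic in levelNodes
--     # }
--     # multiOccupancyCounts[item_id] = itemLevelCounts
--     # this contains a dict for each paper with counts per level of the THG
--     for itemID in list(item_collection_dict.keys()):
--         itemLevelCounts = dict()
--         topicCollection = item_collection_dict[itemID]
--         # iterate through this and convert into the level count dict
--         for topic in topicCollection:
--             if topic == "ROOT":
--                 pass
--             else:
--                 # map topic to level using topicGraphLevelNodes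
--                 for level in list(topicGraphLevelNodes.keys()):
--                     levelTopiclist = topicGraphLevelNodes[level]
--                     if topic in levelTopiclist:
--                         # if there's already a count in the level
--                         if level in itemLevelCounts:
--                             itemLevelCounts[level] += 1
--                         # if there isn't a count already in the level
--                         else:
--                             itemLevelCounts[level] = 1
--                     # if the topic isn't in the current level
--                     else:
--                         pass
--         multiOccupancyCounts[itemID] = itemLevelCounts
--     return multiOccupancyCounts
-- ===== SOURCE B (Python) =====
-- def count_occupancy_THG(
--     topicGraphLevelNodes: dict[int, list[int]],
--     item_collection_dict: dict[int, list[int]],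
-- ) -> dict[int, dict[int, int]]:
--     # Inverted index: topic -> list of levels containing it (each level once, in level order).
--     topic_levels = {}
--     for level, levelNodes in topicGraphLevelNodes.items():
--         for topic in dict.fromkeys(levelNodes):
--             topic_levels.setdefault(topic, []).append(level)
--     multiOccupancyCounts = {}
--     for itemID, topicCollection in item_collection_dict.items():
--         itemLevelCounts = {}
--         for topic in dict.fromkeys(topicCollection):
--             k = topicCollection.count(topic)
--             for level in topic_levels.get(topic, ()):
--                 itemLevelCounts[level] = itemLevelCounts.get(level, 0) + k
--         multiOccupancyCounts[itemID] = itemLevelCounts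
--     return multiOccupancyCounts
-- ===== Notes on version B (the rewrite author's own statement) =====
-- stated objective: faster
-- what changed: B builds a topic->levels inverted index over topicGraphLevelNodes once and, per item, groups duplicate topics (one count per distinct topic), so each item's level counts come from direct index lookups instead of A's scan of every level's node list for every topic occurrence.
import Mathlib
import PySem

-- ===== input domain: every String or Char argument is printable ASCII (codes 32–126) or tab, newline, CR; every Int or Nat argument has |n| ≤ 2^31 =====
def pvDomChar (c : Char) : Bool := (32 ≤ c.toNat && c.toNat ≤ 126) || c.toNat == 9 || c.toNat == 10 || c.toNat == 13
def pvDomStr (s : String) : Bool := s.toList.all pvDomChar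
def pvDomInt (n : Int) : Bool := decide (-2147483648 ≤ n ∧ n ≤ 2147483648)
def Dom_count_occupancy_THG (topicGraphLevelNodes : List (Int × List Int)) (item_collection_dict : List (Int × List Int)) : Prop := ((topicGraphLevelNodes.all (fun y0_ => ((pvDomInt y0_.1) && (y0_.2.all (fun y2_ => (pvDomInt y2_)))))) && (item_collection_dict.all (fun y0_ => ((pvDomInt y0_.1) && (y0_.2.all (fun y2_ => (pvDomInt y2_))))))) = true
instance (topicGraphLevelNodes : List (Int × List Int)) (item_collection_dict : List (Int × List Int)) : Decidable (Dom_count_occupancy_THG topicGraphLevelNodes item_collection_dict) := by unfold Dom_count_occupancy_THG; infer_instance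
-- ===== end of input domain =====

-- B builds a topic→levels inverted index once and groups each item's duplicate topics,
-- replacing A's rescan of every level's node list for every topic occurrence of every item.

-- ===== PORT A =====
-- first-match lookup in the association list; the default [] is never reached in the ports,
-- since every looked-up key is drawn from the same list's keys (Python's d[k])
def pvLookup (d : List (Int × List Int)) (k : Int) : List Int :=
  match d.find? (fun p => p.1 == k) with
  | some p => p.2
  | none => []

def count_occupancy_THG (topicGraphLevelNodes : List (Int × List Int)) (item_collection_dict : List (Int × List Int)) : List (Int × List (Int × Int)) :=
  ((item_collection_dict.map Prod.fst).foldl (fun multiOccupancyCounts itemID =>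
    let topicCollection := pvLookup item_collection_dict itemID
    let itemLevelCounts := topicCollection.foldl (fun itemLevelCounts topic =>
      -- `topic == "ROOT"` never holds for an int topic, so the else branch runs
      (topicGraphLevelNodes.map Prod.fst).foldl (fun itemLevelCounts level =>
        let levelTopiclist := pvLookup topicGraphLevelNodes level
        if levelTopiclist.contains topic then
          if itemLevelCounts.contains level then
            itemLevelCounts.insert level (itemLevelCounts.getD level 0 + 1)
          else
            itemLevelCounts.insert level 1
        else itemLevelCounts) itemLevelCounts)
      (PySem.Dict.empty : PySem.Dict Int Int)
    multiOccupancyCounts.insert itemID itemLevelCounts.items)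
    (PySem.Dict.empty : PySem.Dict Int (List (Int × Int)))).items

-- ===== PORT B =====
def count_occupancy_THG_alt (topicGraphLevelNodes : List (Int × List Int)) (item_collection_dict : List (Int × List Int)) : List (Int × List (Int × Int)) :=
  let topicLevels : PySem.Dict Int (List Int) :=
    topicGraphLevelNodes.foldl (fun idx p =>
      (PySem.List.dedup p.2).foldl (fun idx topic => idx.modify topic [] (· ++ [p.1])) idx)
      PySem.Dict.empty
  (item_collection_dict.foldl (fun multiOccupancyCounts p =>
    let itemLevelCounts := (PySem.List.dedup p.2).foldl (fun itemLevelCounts topic =>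
      let k : Int := (p.2.count topic : Int)
      (topicLevels.getD topic []).foldl (fun itemLevelCounts level =>
        itemLevelCounts.insert level (itemLevelCounts.getD level 0 + k)) itemLevelCounts)
      (PySem.Dict.empty : PySem.Dict Int Int)
    multiOccupancyCounts.insert p.1 itemLevelCounts.items)
    (PySem.Dict.empty : PySem.Dict Int (List (Int × Int)))).items

-- ===== PRECONDITION & SPEC =====
-- Pre_ excludes association lists with duplicate keys: a Python dict cannot hold two entries
-- with the same key, so such lists have no canonical dict meaning (first- vs last-match is a
-- representation artefact, not A's behaviour).
def Pre_count_occupancy_THG (topicGraphLevelNodes : List (Int × List Int)) (item_collection_dict : List (Int × List Int)) : Prop :=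
  (topicGraphLevelNodes.map Prod.fst).Nodup ∧ (item_collection_dict.map Prod.fst).Nodup
instance (topicGraphLevelNodes : List (Int × List Int)) (item_collection_dict : List (Int × List Int)) : Decidable (Pre_count_occupancy_THG topicGraphLevelNodes item_collection_dict) := by unfold Pre_count_occupancy_THG; infer_instance

def pvWitness_count_occupancy_THG : (List (Int × List Int)) × (List (Int × List Int)) :=
  ([(0, [1, 2]), (1, [2, 3])], [(10, [1, 2, 2]), (11, [3])])

def Spec_count_occupancy_THG (topicGraphLevelNodes : List (Int × List Int)) (item_collection_dict : List (Int × List Int)) (out : List (Int × List (Int × Int))) : Prop := out = count_occupancy_THG_alt topicGraphLevelNodes item_collection_dict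
instance (topicGraphLevelNodes : List (Int × List Int)) (item_collection_dict : List (Int × List Int)) (out : List (Int × List (Int × Int))) : Decidable (Spec_count_occupancy_THG topicGraphLevelNodes item_collection_dict out) := by unfold Spec_count_occupancy_THG; infer_instance

-- ===== CLAIM (what is proved, stated in full; the proofs are below) =====
def Claim_equal_count_occupancy_THG : Prop := ∀ (topicGraphLevelNodes : List (Int × List Int)) (item_collection_dict : List (Int × List Int)), Dom_count_occupancy_THG topicGraphLevelNodes item_collection_dict → Pre_count_occupancy_THG topicGraphLevelNodes item_collection_dict → Spec_count_occupancy_THG topicGraphLevelNodes item_collection_dict (count_occupancy_THG topicGraphLevelNodes item_collection_dict)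

-- ===== LEMMAS AND PROOFS =====

-- first-match lookup of an entry's own key in a duplicate-free association list is its value
theorem pvLookup_of_mem (d : List (Int × List Int)) : (d.map Prod.fst).Nodup →
    ∀ p ∈ d, pvLookup d p.1 = p.2 := by
  induction d with
  | nil => intro _ p hp; cases hp
  | cons q t ih =>
      intro hnd p hp
      simp only [List.map_cons, List.nodup_cons] at hnd
      rcases List.mem_cons.mp hp with hp | hp
      · subst hp; simp [pvLookup]
      · have hne : q.1 ≠ p.1 := by
          intro h; exact hnd.1 (h ▸ List.mem_map_of_mem hp)
        have hb : (q.1 == p.1) = false := by simp [hne]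
        simpa [pvLookup, hb] using ih hnd.2 p hp

-- A's two-branch increment is an unconditional counter bump
theorem bump_eq (ilc : PySem.Dict Int Int) (level : Int) :
    (if ilc.contains level then ilc.insert level (ilc.getD level 0 + 1)
     else ilc.insert level 1) = ilc.insert level (ilc.getD level 0 + 1) := by
  by_cases h : ilc.contains level = true
  · simp [h]
  · have h' : ilc.contains level = false := by simpa using h
    rw [PySem.Dict.getD_of_not_contains _ _ h']
    simp [h']

-- one level's contribution to the inverted index, seen through getD
theorem idx_step_getD (d : PySem.Dict Int (List Int)) (ns : List Int) (l topic : Int) :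
    ((PySem.List.dedup ns).foldl (fun idx t => idx.modify t [] (· ++ [l])) d).getD topic []
      = d.getD topic [] ++ (if ns.contains topic then [l] else []) := by
  have hmap : (PySem.List.dedup ns).foldl (fun idx t => idx.modify t [] (· ++ [l])) d
      = ((PySem.List.dedup ns).map (fun t => (t, l))).foldl (fun idx p => idx.modify p.1 [] (· ++ [p.2])) d := by
    rw [List.foldl_map]
  rw [hmap, PySem.Dict.getD_foldl_modify_append]
  congr 1
  have hfil : ((PySem.List.dedup ns).map (fun t => (t, l))).filter (fun p => p.1 == topic)
      = ((PySem.List.dedup ns).filter (· == topic)).map (fun t => (t, l)) := by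
    rw [List.filter_map]; rfl
  rw [hfil]
  by_cases hm : topic ∈ ns
  · have hmem : topic ∈ PySem.List.dedup ns := (PySem.List.mem_dedup ns topic).mpr hm
    rw [List.filter_beq, List.count_eq_one_of_mem (PySem.List.nodup_dedup ns) hmem]
    simp [hm]
  · have hmem : topic ∉ PySem.List.dedup ns := fun h => hm ((PySem.List.mem_dedup ns topic).mp h)
    rw [List.filter_beq, List.count_eq_zero_of_not_mem hmem]
    simp [hm]

-- the inverted index lists, per topic, exactly the levels whose node list contains it, in order
theorem idx_getD (tg : List (Int × List Int)) (d : PySem.Dict Int (List Int)) (topic : Int) :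
    (tg.foldl (fun idx p => (PySem.List.dedup p.2).foldl (fun idx t => idx.modify t [] (· ++ [p.1])) idx) d).getD topic []
      = d.getD topic [] ++ ((tg.filter (fun p => p.2.contains topic)).map Prod.fst) := by
  induction tg generalizing d with
  | nil => simp
  | cons q t ih =>
      simp only [List.foldl_cons, ih, idx_step_getD, List.filter_cons, List.append_assoc]
      by_cases hm : topic ∈ q.2
      · simp [hm, List.contains_eq_mem]
      · simp [hm, List.contains_eq_mem]

-- per topic, A's scan over all levels equals a walk of the inverted index with +1 bumps
theorem step_eq (tg : List (Int × List Int)) (hnd : (tg.map Prod.fst).Nodup)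
    (topic : Int) (ilc : PySem.Dict Int Int) :
    (tg.map Prod.fst).foldl (fun ilc level =>
        if (pvLookup tg level).contains topic then
          if ilc.contains level then ilc.insert level (ilc.getD level 0 + 1)
          else ilc.insert level 1
        else ilc) ilc
    = ((tg.foldl (fun idx p => (PySem.List.dedup p.2).foldl (fun idx t => idx.modify t [] (· ++ [p.1])) idx) PySem.Dict.empty).getD topic []).foldl
        (fun ilc level => ilc.insert level (ilc.getD level 0 + 1)) ilc := by
  rw [idx_getD, PySem.Dict.getD_empty, List.nil_append]
  rw [List.foldl_map]
  rw [List.foldl_map]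
  have hcg : tg.foldl (fun ilc p =>
        if (pvLookup tg p.1).contains topic then
          if ilc.contains p.1 then ilc.insert p.1 (ilc.getD p.1 0 + 1)
          else ilc.insert p.1 1
        else ilc) ilc
      = tg.foldl (fun ilc p =>
        if p.2.contains topic then ilc.insert p.1 (ilc.getD p.1 0 + 1) else ilc) ilc := by
    apply PySem.List.foldl_congr_mem
    intro acc p hp
    rw [pvLookup_of_mem tg hnd p hp, bump_eq]
  rw [hcg]
  rw [PySem.List.foldl_if_eq_foldl_filter]

-- ----- weighted-counter canonical form: a fold of keyed increments -----

def pvFw (xs : List (Int × Int)) (d : PySem.Dict Int Int) : PySem.Dict Int Int :=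
  xs.foldl (fun c p => c.insert p.1 (c.getD p.1 0 + p.2)) d

theorem pvFw_keys (xs : List (Int × Int)) (d : PySem.Dict Int Int) :
    (pvFw xs d).keys = PySem.Set.update d.keys (xs.map Prod.fst) := by
  unfold pvFw
  exact PySem.Dict.keys_foldl_insert_key xs Prod.fst (fun c p => c.getD p.1 0 + p.2) d

theorem pvFw_nodup_keys (xs : List (Int × Int)) (d : PySem.Dict Int Int)
    (h : d.keys.Nodup) : (pvFw xs d).keys.Nodup := by
  unfold pvFw
  exact PySem.Dict.nodup_keys_foldl_insert_key xs Prod.fst (fun c p => c.getD p.1 0 + p.2) d h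

theorem pvFw_getD (xs : List (Int × Int)) (d : PySem.Dict Int Int) (l : Int) :
    (pvFw xs d).getD l 0 = d.getD l 0 + ((xs.filter (fun p => p.1 == l)).map Prod.snd).sum := by
  induction xs generalizing d with
  | nil => simp [pvFw]
  | cons p ps ih =>
      simp only [pvFw, List.foldl_cons] at ih ⊢
      rw [ih, PySem.Dict.getD_insert, List.filter_cons]
      by_cases h : l = p.1
      · subst h; simp; ring
      · have hb : (p.1 == l) = false := by simp [Ne.symm h]
        simp [h, hb]

-- a nested fold of weighted bumps is pvFw over the flattened (key, weight) pairs
theorem fold2_eq_pvFw (L : Int → List Int) (w : Int → Int) (xs : List Int) (d : PySem.Dict Int Int) :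
    xs.foldl (fun c t => (L t).foldl (fun c v => c.insert v (c.getD v 0 + w t)) c) d
      = pvFw (xs.flatMap (fun t => (L t).map (fun v => (v, w t)))) d := by
  unfold pvFw
  rw [List.foldl_flatMap]
  apply PySem.List.foldl_congr_mem
  intro c t _
  rw [List.foldl_map]

theorem pairs_filter_sum (L : Int → List Int) (w : Int → Int) (t l : Int) :
    ((((L t).map (fun v => (v, w t))).filter (fun p => p.1 == l)).map Prod.snd)
      = List.replicate ((L t).count l) (w t) := by
  rw [List.filter_map, List.map_map]
  have h1 : ((L t).filter ((fun p : Int × Int => p.1 == l) ∘ (fun v => (v, w t))))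
      = (L t).filter (· == l) := by rfl
  rw [h1, List.filter_beq, List.map_replicate]
  rfl

-- own small fact: sum over a flatMap is the sum of per-block sums
theorem pv_sum_flatMap (l : List Int) (h : Int → List Int) :
    (List.flatMap h l).sum = (l.map (fun t => (h t).sum)).sum := by
  induction l with
  | nil => simp
  | cons x xs ih => simp [List.flatMap_cons, ih]

theorem pvFw_pairs_getD (L : Int → List Int) (w : Int → Int) (xs : List Int) (l : Int) :
    (pvFw (xs.flatMap (fun t => (L t).map (fun v => (v, w t)))) PySem.Dict.empty).getD l 0
      = (xs.map (fun t => ((L t).count l : Int) * w t)).sum := by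
  rw [pvFw_getD, PySem.Dict.getD_empty, List.filter_flatMap, List.map_flatMap, pv_sum_flatMap]
  rw [zero_add]
  apply congrArg
  apply List.map_congr_left
  intro t _
  rw [pairs_filter_sum, List.sum_replicate_int]

theorem pvFw_pairs_keys (L : Int → List Int) (w : Int → Int) (xs : List Int) :
    (pvFw (xs.flatMap (fun t => (L t).map (fun v => (v, w t)))) PySem.Dict.empty).keys
      = PySem.Set.ofList (xs.flatMap L) := by
  rw [pvFw_keys, PySem.Dict.keys_empty, PySem.Set.update_nil_left]
  congr 1
  rw [List.map_flatMap]
  apply List.flatMap_congr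
  intro t _
  have hid : (Prod.fst ∘ fun v : Int => (v, w t)) = id := rfl
  rw [List.map_map, hid, List.map_id]

-- ----- ordered-dedup (Python set / dict.fromkeys) facts -----

theorem set_ofList_cons (t : Int) (ts : List Int) :
    PySem.Set.ofList (t :: ts) = t :: (PySem.Set.ofList ts).filter (fun y => !(y == t)) := by
  have h1 : PySem.Set.ofList (t :: ts) = PySem.Set.update [t] ts := rfl
  rw [h1, PySem.Set.update_eq_append_filter, List.singleton_append]
  congr 1
  apply List.filter_congr
  intro y _
  by_cases h : y = t
  · simp [PySem.Set.contains, h]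
  · simp [PySem.Set.contains, h]

theorem set_ofList_filter (t : Int) (ts : List Int) :
    (PySem.Set.ofList ts).filter (fun y => !(y == t)) = PySem.Set.ofList (ts.filter (fun y => !(y == t))) := by
  induction ts with
  | nil => rfl
  | cons u us ih =>
      by_cases h : u = t
      · subst h
        have hneg : ¬ ((fun y : Int => !(y == u)) u) = true := by simp
        have hand : (fun a : Int => (!(a == u)) && (!(a == u))) = (fun y : Int => !(y == u)) := by
          funext a; exact Bool.and_self _
        rw [set_ofList_cons, List.filter_cons_of_neg (p := fun y : Int => !(y == u)) hneg,
            List.filter_cons_of_neg (p := fun y : Int => !(y == u)) hneg, List.filter_filter,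
            hand, ih]
      · have hpos : ((fun y : Int => !(y == t)) u) = true := by simp [h]
        rw [set_ofList_cons, List.filter_cons_of_pos (p := fun y : Int => !(y == t)) hpos,
            List.filter_cons_of_pos (p := fun y : Int => !(y == t)) hpos,
            set_ofList_cons, List.filter_comm, ih]

theorem set_mem_update (s : PySem.Set Int) (ys : List Int) (x : Int) :
    x ∈ PySem.Set.update s ys ↔ x ∈ s ∨ x ∈ ys := by
  have h1 : PySem.Set.update s ys = ys.foldl (fun s b => PySem.Set.add s b) s := rfl
  rw [h1]
  simpa using PySem.Set.mem_foldl_add ys id s x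

theorem set_update_saturated (s : PySem.Set Int) (ys : List Int)
    (h : ∀ x ∈ ys, x ∈ s) : PySem.Set.update s ys = s := by
  rw [PySem.Set.update_eq_append_filter]
  have hnil : List.filter (fun y => !s.contains y) (PySem.Set.ofList ys) = [] := by
    rw [List.filter_eq_nil_iff]
    intro a ha
    have ham : a ∈ ys := (PySem.Set.mem_ofList _ _).mp ha
    simp only [Bool.not_eq_true]
    rw [(PySem.Set.contains_iff s a).mpr (h a ham)]
    rfl
  rw [hnil, List.append_nil]

-- occurrences of an already-processed topic contribute no new levels to the running set
theorem upd_drop (L : Int → List Int) (t : Int) : ∀ (ts : List Int) (s : PySem.Set Int),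
    (∀ x ∈ L t, x ∈ s) →
    PySem.Set.update s (ts.flatMap L) = PySem.Set.update s ((ts.filter (fun u => !(u == t))).flatMap L) := by
  intro ts
  induction ts with
  | nil => intro s _; rfl
  | cons u us ih =>
      intro s hs
      rw [List.flatMap_cons, PySem.Set.update_append]
      by_cases h : u = t
      · subst h
        have hneg : ¬ ((fun y : Int => !(y == u)) u) = true := by simp
        rw [List.filter_cons_of_neg (p := fun y : Int => !(y == u)) hneg,
            set_update_saturated s (L u) hs]
        exact ih s hs
      · have hpos : ((fun y : Int => !(y == t)) u) = true := by simp [h]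
        rw [List.filter_cons_of_pos (p := fun y : Int => !(y == t)) hpos,
            List.flatMap_cons, PySem.Set.update_append]
        exact ih (PySem.Set.update s (L u)) (fun x hx => (set_mem_update _ _ _).mpr (Or.inl (hs x hx)))

-- flattening over a topic list equals flattening over its ordered dedup
theorem upd_dedup (L : Int → List Int) : ∀ (n : Nat) (xs : List Int), xs.length ≤ n →
    ∀ s : PySem.Set Int,
    PySem.Set.update s (xs.flatMap L) = PySem.Set.update s ((PySem.Set.ofList xs).flatMap L) := by
  intro n
  induction n with
  | zero =>
      intro xs h s
      have : xs = [] := List.eq_nil_of_length_eq_zero (Nat.le_zero.mp h)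
      subst this; rfl
  | succ n ih =>
      intro xs h s
      match xs with
      | [] => rfl
      | t :: ts =>
          rw [List.flatMap_cons, PySem.Set.update_append]
          rw [upd_drop L t ts _ (fun x hx => (set_mem_update _ _ _).mpr (Or.inr hx))]
          rw [ih (ts.filter (fun u => !(u == t)))
                (le_trans (List.length_filter_le _ _) (Nat.le_of_succ_le_succ h)) _]
          rw [set_ofList_cons, List.flatMap_cons, PySem.Set.update_append, set_ofList_filter]

-- own small fact: a sum split by a Boolean test
theorem pv_sum_split (l : List Int) (p : Int → Bool) (g : Int → Int) :
    (l.map g).sum = ((l.filter p).map g).sum + ((l.filter (fun x => !p x)).map g).sum := by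
  induction l with
  | nil => simp
  | cons x xs ih =>
      by_cases h : p x = true <;> simp [h, ih] <;> ring

-- grouping a sum by ordered-dedup with multiplicities
theorem sum_group (g : Int → Int) : ∀ (n : Nat) (ts : List Int), ts.length ≤ n →
    (ts.map g).sum = ((PySem.Set.ofList ts).map (fun t => (ts.count t : Int) * g t)).sum := by
  intro n
  induction n with
  | zero =>
      intro ts h
      have : ts = [] := List.eq_nil_of_length_eq_zero (Nat.le_zero.mp h)
      subst this; rfl
  | succ n ih =>
      intro ts h
      match ts with
      | [] => rfl
      | t :: us =>
          rw [set_ofList_cons, set_ofList_filter]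
          rw [List.map_cons, List.sum_cons, List.map_cons, List.sum_cons]
          rw [pv_sum_split us (· == t) g]
          have h1 : ((us.filter (· == t)).map g).sum = (us.count t : Int) * g t := by
            rw [List.filter_beq, List.map_replicate, List.sum_replicate_int]
          have h2 : ((PySem.Set.ofList (us.filter (fun x => !(x == t)))).map
                (fun u => ((t :: us).count u : Int) * g u)).sum
              = ((us.filter (fun x => !(x == t))).map g).sum := by
            rw [ih (us.filter (fun x => !(x == t)))
                  (le_trans (List.length_filter_le _ _) (Nat.le_of_succ_le_succ h))]
            apply congrArg
            apply List.map_congr_left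
            intro u hu
            have hu' : u ∈ us.filter (fun x => !(x == t)) := (PySem.Set.mem_ofList _ _).mp hu
            have hne : ¬(u == t) = true := by
              have := List.of_mem_filter hu'
              simpa using this
            have hne' : u ≠ t := by simpa using hne
            rw [List.count_cons_of_ne hne'.symm]
            rw [List.count_filter]
            simp [hne']
          rw [h2, h1]
          have hc : ((t :: us).count t : Int) = (us.count t : Int) + 1 := by
            rw [List.count_cons_self]; push_cast; ring
          rw [hc]; ring

-- the central reorganisation: per-occurrence +1 bumps equal per-distinct-topic +count bumps
theorem grouped (L : Int → List Int) (topics : List Int) :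
    topics.foldl (fun c t => (L t).foldl (fun c v => c.insert v (c.getD v 0 + 1)) c) PySem.Dict.empty
      = (PySem.Set.ofList topics).foldl
          (fun c t => (L t).foldl (fun c v => c.insert v (c.getD v 0 + (topics.count t : Int))) c)
          PySem.Dict.empty := by
  rw [fold2_eq_pvFw L (fun _ => (1 : Int)), fold2_eq_pvFw L (fun t => (topics.count t : Int))]
  apply PySem.Dict.ext
  rw [PySem.Dict.items_eq_map_keys _ (pvFw_nodup_keys _ _ PySem.Dict.nodup_keys_empty) 0,
      PySem.Dict.items_eq_map_keys _ (pvFw_nodup_keys _ _ PySem.Dict.nodup_keys_empty) 0]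
  rw [pvFw_pairs_keys, pvFw_pairs_keys]
  have hkeys : PySem.Set.ofList (topics.flatMap L) = PySem.Set.ofList ((PySem.Set.ofList topics).flatMap L) := by
    have := upd_dedup L topics.length topics le_rfl []
    simpa [PySem.Set.update_nil_left] using this
  rw [← hkeys]
  apply List.map_congr_left
  intro k _
  rw [pvFw_pairs_getD, pvFw_pairs_getD]
  have := sum_group (fun t => ((L t).count k : Int)) topics.length topics le_rfl
  simp only [mul_one] at this ⊢
  rw [this]
  apply congrArg (Prod.mk k)
  apply congrArg List.sum
  apply List.map_congr_left
  intro t _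
  ring

-- ===== VERDICT (by name: the statement is the Claim_ definition above) =====
theorem count_occupancy_THG_spec : Claim_equal_count_occupancy_THG := by
  intro tg icd _hdom hpre
  unfold Spec_count_occupancy_THG count_occupancy_THG count_occupancy_THG_alt
  rw [List.foldl_map]
  congr 1
  apply PySem.List.foldl_congr_mem
  intro acc p hp
  have h2 : List.foldl (fun itemLevelCounts topic =>
        (tg.map Prod.fst).foldl (fun itemLevelCounts level =>
          let levelTopiclist := pvLookup tg level
          if levelTopiclist.contains topic then
            if itemLevelCounts.contains level then
              itemLevelCounts.insert level (itemLevelCounts.getD level 0 + 1)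
            else itemLevelCounts.insert level 1
          else itemLevelCounts) itemLevelCounts)
      (PySem.Dict.empty : PySem.Dict Int Int) (pvLookup icd p.1)
      = List.foldl (fun itemLevelCounts topic =>
        ((tg.foldl (fun idx p => (PySem.List.dedup p.2).foldl (fun idx t => idx.modify t [] (· ++ [p.1])) idx) PySem.Dict.empty).getD topic []).foldl
          (fun itemLevelCounts level => itemLevelCounts.insert level (itemLevelCounts.getD level 0 + 1)) itemLevelCounts)
      (PySem.Dict.empty : PySem.Dict Int Int) p.2 := by
    rw [pvLookup_of_mem icd hpre.2 p hp]
    exact PySem.List.foldl_congr_mem _ _ _ _ (fun ilc topic _ => step_eq tg hpre.1 topic ilc)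
  have h3 := grouped (fun t => (tg.foldl (fun idx p => (PySem.List.dedup p.2).foldl (fun idx t => idx.modify t [] (· ++ [p.1])) idx) PySem.Dict.empty).getD t []) p.2
  rw [PySem.List.dedup_eq_ofList]
  exact congrArg (fun x : PySem.Dict Int Int => acc.insert p.1 x.items) (h2.trans h3)
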